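-- pv_equiv track=rewrite | github.com/sharmachaitanya945/soccer-player-reid | code/color_utils.py | determine_team_from_color
-- ===== SOURCE A (Python) =====
-- def determine_team_from_color(detected_color, team1_color, team2_color):
--     """
--     Determine which team a player belongs to based on detected color and team configuration
--     """
--     # Direct name matching (case-insensitive)
--     if detected_color.lower() == team1_color["name"].lower():
--         return "team1"
--     elif detected_color.lower() == team2_color["name"].lower():
--         return "team2"
--
--     # Color similarity matching for common color variations
--     color_variants = {
--         "red": ["red", "crimson", "maroon"],
--         "blue": ["blue", "navy", "royal", "sky"],
--         "green": ["green", "forest", "lime"],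
--         "yellow": ["yellow", "gold", "amber"],
--         "white": ["white", "silver", "light"],
--         "black": ["black", "dark"],
--         "purple": ["purple", "violet", "magenta"]
--     }
--
--     # Check if detected color matches any variant of team colors
--     for base_color, variants in color_variants.items():
--         if detected_color.lower() in variants:
--             if team1_color["name"].lower() in variants:
--                 return "team1"
--             elif team2_color["name"].lower() in variants:
--                 return "team2"
--
--     return "unknown"
-- ===== SOURCE B (Python) =====
-- # Inverted index: map each variant name to its base group once; team check becomes direct lookups.
-- _VARIANT_GROUP = {
--     "red": "red", "crimson": "red", "maroon": "red",
--     "blue": "blue", "navy": "blue", "royal": "blue", "sky": "blue",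
--     "green": "green", "forest": "green", "lime": "green",
--     "yellow": "yellow", "gold": "yellow", "amber": "yellow",
--     "white": "white", "silver": "white", "light": "white",
--     "black": "black", "dark": "black",
--     "purple": "purple", "violet": "purple", "magenta": "purple",
-- }
--
--
-- def determine_team_from_color(detected_color, team1_color, team2_color):
--     d = detected_color.lower()
--     if d == team1_color["name"].lower():
--         return "team1"
--     if d == team2_color["name"].lower():
--         return "team2"
--     group = _VARIANT_GROUP.get(d)
--     if group is None:
--         return "unknown"
--     if _VARIANT_GROUP.get(team1_color["name"].lower()) == group:
--         return "team1"
--     if _VARIANT_GROUP.get(team2_color["name"].lower()) == group: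
--         return "team2"
--     return "unknown"
-- ===== Notes on version B (the rewrite author's own statement) =====
-- stated objective: idiomatic
-- what changed: Replaced the scan over the color_variants groups (list membership per group) with a precomputed inverted index variant->base-group, so team classification becomes three direct dictionary lookups compared for equality.
import Mathlib
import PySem

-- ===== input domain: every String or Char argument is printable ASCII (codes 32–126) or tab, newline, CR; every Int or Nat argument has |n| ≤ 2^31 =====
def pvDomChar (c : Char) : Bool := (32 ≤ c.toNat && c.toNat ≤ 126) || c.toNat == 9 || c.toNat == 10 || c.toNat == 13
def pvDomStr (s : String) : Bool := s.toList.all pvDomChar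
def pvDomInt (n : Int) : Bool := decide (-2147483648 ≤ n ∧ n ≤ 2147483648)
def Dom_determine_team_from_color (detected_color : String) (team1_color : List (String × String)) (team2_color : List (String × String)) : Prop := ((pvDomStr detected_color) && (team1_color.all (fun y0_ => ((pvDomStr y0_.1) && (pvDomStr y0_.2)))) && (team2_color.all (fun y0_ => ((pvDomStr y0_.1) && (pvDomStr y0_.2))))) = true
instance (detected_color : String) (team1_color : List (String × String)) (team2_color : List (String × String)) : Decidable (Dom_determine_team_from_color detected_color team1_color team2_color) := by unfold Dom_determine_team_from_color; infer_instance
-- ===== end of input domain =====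

-- B replaces A's scan over the color_variants groups by a precomputed inverted index
-- (variant name -> base group) and direct lookups; same return value on Pre_.

-- ===== PORT A =====
def pvVariantsA : List (String × List String) :=
  [("red", ["red", "crimson", "maroon"]),
   ("blue", ["blue", "navy", "royal", "sky"]),
   ("green", ["green", "forest", "lime"]),
   ("yellow", ["yellow", "gold", "amber"]),
   ("white", ["white", "silver", "light"]),
   ("black", ["black", "dark"]),
   ("purple", ["purple", "violet", "magenta"])]

-- the 'for base_color, variants in color_variants.items()' loop of A
def pvLoopA (d t1 t2 : String) : List (String × List String) → String
  | [] => "unknown"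
  | (_, vs) :: rest =>
    if d ∈ vs then
      if t1 ∈ vs then "team1"
      else if t2 ∈ vs then "team2"
      else pvLoopA d t1 t2 rest
    else pvLoopA d t1 t2 rest

def determine_team_from_color (detected_color : String) (team1_color : List (String × String)) (team2_color : List (String × String)) : String :=
  match (PySem.Dict.mk team1_color).get? "name" with
  | none => ""  -- KeyError in Python; excluded by Pre_
  | some n1 =>
    if PySem.Str.lower detected_color = PySem.Str.lower n1 then "team1"
    else
      match (PySem.Dict.mk team2_color).get? "name" with
      | none => ""  -- KeyError in Python; excluded by Pre_
      | some n2 =>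
        if PySem.Str.lower detected_color = PySem.Str.lower n2 then "team2"
        else pvLoopA (PySem.Str.lower detected_color) (PySem.Str.lower n1) (PySem.Str.lower n2) pvVariantsA

-- ===== PORT B =====
def pvVariantGroup : PySem.Dict String String :=
  PySem.Dict.mk
    [("red", "red"), ("crimson", "red"), ("maroon", "red"),
     ("blue", "blue"), ("navy", "blue"), ("royal", "blue"), ("sky", "blue"),
     ("green", "green"), ("forest", "green"), ("lime", "green"),
     ("yellow", "yellow"), ("gold", "yellow"), ("amber", "yellow"),
     ("white", "white"), ("silver", "white"), ("light", "white"),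
     ("black", "black"), ("dark", "black"),
     ("purple", "purple"), ("violet", "purple"), ("magenta", "purple")]

def determine_team_from_color_alt (detected_color : String) (team1_color : List (String × String)) (team2_color : List (String × String)) : String :=
  let d := PySem.Str.lower detected_color
  match (PySem.Dict.mk team1_color).get? "name" with
  | none => ""  -- KeyError in Python; excluded by Pre_
  | some n1 =>
    if d = PySem.Str.lower n1 then "team1"
    else
      match (PySem.Dict.mk team2_color).get? "name" with
      | none => ""  -- KeyError in Python; excluded by Pre_
      | some n2 =>
        if d = PySem.Str.lower n2 then "team2"
        else
          match pvVariantGroup.get? d with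
          | none => "unknown"
          | some g =>
            if pvVariantGroup.get? (PySem.Str.lower n1) = some g then "team1"
            else if pvVariantGroup.get? (PySem.Str.lower n2) = some g then "team2"
            else "unknown"

-- ===== PRECONDITION & SPEC =====
-- Pre_ excludes exactly the inputs where the Python A raises KeyError: team1_color must
-- carry a "name" key, and team2_color must too unless the team1 name check already returns.
def Pre_determine_team_from_color (detected_color : String) (team1_color : List (String × String)) (team2_color : List (String × String)) : Prop :=
  (match (PySem.Dict.mk team1_color).get? "name" with
   | none => false
   | some n1 =>
     (PySem.Str.lower detected_color == PySem.Str.lower n1)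
       || ((PySem.Dict.mk team2_color).get? "name").isSome) = true
instance (detected_color : String) (team1_color : List (String × String)) (team2_color : List (String × String)) : Decidable (Pre_determine_team_from_color detected_color team1_color team2_color) := by unfold Pre_determine_team_from_color; infer_instance

def pvWitness_determine_team_from_color : String × (List (String × String)) × (List (String × String)) :=
  ("Crimson", [("name", "Red")], [("name", "Navy")])

def Spec_determine_team_from_color (detected_color : String) (team1_color : List (String × String)) (team2_color : List (String × String)) (out : String) : Prop := out = determine_team_from_color_alt detected_color team1_color team2_color
instance (detected_color : String) (team1_color : List (String × String)) (team2_color : List (String × String)) (out : String) : Decidable (Spec_determine_team_from_color detected_color team1_color team2_color out) := by unfold Spec_determine_team_from_color; infer_instance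

-- ===== CLAIM (what is proved, stated in full; the proofs are below) =====
def Claim_equal_determine_team_from_color : Prop := ∀ (detected_color : String) (team1_color : List (String × String)) (team2_color : List (String × String)), Dom_determine_team_from_color detected_color team1_color team2_color → Pre_determine_team_from_color detected_color team1_color team2_color → Spec_determine_team_from_color detected_color team1_color team2_color (determine_team_from_color detected_color team1_color team2_color)

-- ===== LEMMAS AND PROOFS =====

-- closed form of the inverted index lookup
lemma vg_eq (t : String) :
    pvVariantGroup.get? t =
      (if t ∈ ["red", "crimson", "maroon"] then some "red"
       else if t ∈ ["blue", "navy", "royal", "sky"] then some "blue"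
       else if t ∈ ["green", "forest", "lime"] then some "green"
       else if t ∈ ["yellow", "gold", "amber"] then some "yellow"
       else if t ∈ ["white", "silver", "light"] then some "white"
       else if t ∈ ["black", "dark"] then some "black"
       else if t ∈ ["purple", "violet", "magenta"] then some "purple"
       else none) := by
  split_ifs with h1 h2 h3 h4 h5 h6 h7
  · rcases (show t = "red" ∨ t = "crimson" ∨ t = "maroon" by simpa using h1) with rfl|rfl|rfl <;> rfl
  · rcases (show t = "blue" ∨ t = "navy" ∨ t = "royal" ∨ t = "sky" by simpa using h2) with rfl|rfl|rfl|rfl <;> rfl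
  · rcases (show t = "green" ∨ t = "forest" ∨ t = "lime" by simpa using h3) with rfl|rfl|rfl <;> rfl
  · rcases (show t = "yellow" ∨ t = "gold" ∨ t = "amber" by simpa using h4) with rfl|rfl|rfl <;> rfl
  · rcases (show t = "white" ∨ t = "silver" ∨ t = "light" by simpa using h5) with rfl|rfl|rfl <;> rfl
  · rcases (show t = "black" ∨ t = "dark" by simpa using h6) with rfl|rfl <;> rfl
  · rcases (show t = "purple" ∨ t = "violet" ∨ t = "magenta" by simpa using h7) with rfl|rfl|rfl <;> rfl
  · simp only [List.mem_cons, List.not_mem_nil, or_false, not_or] at h1 h2 h3 h4 h5 h6 h7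
    simp [pvVariantGroup, PySem.Dict.get?,
      Ne.symm h1.1, Ne.symm h1.2.1, Ne.symm h1.2.2, Ne.symm h2.1, Ne.symm h2.2.1, Ne.symm h2.2.2.1, Ne.symm h2.2.2.2, Ne.symm h3.1, Ne.symm h3.2.1, Ne.symm h3.2.2, Ne.symm h4.1, Ne.symm h4.2.1, Ne.symm h4.2.2, Ne.symm h5.1, Ne.symm h5.2.1, Ne.symm h5.2.2, Ne.symm h6.1, Ne.symm h6.2, Ne.symm h7.1, Ne.symm h7.2.1, Ne.symm h7.2.2]

lemma vg_lit_red : pvVariantGroup.get? "red" = some "red" := rfl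
lemma vg_lit_crimson : pvVariantGroup.get? "crimson" = some "red" := rfl
lemma vg_lit_maroon : pvVariantGroup.get? "maroon" = some "red" := rfl
lemma vg_lit_blue : pvVariantGroup.get? "blue" = some "blue" := rfl
lemma vg_lit_navy : pvVariantGroup.get? "navy" = some "blue" := rfl
lemma vg_lit_royal : pvVariantGroup.get? "royal" = some "blue" := rfl
lemma vg_lit_sky : pvVariantGroup.get? "sky" = some "blue" := rfl
lemma vg_lit_green : pvVariantGroup.get? "green" = some "green" := rfl
lemma vg_lit_forest : pvVariantGroup.get? "forest" = some "green" := rfl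
lemma vg_lit_lime : pvVariantGroup.get? "lime" = some "green" := rfl
lemma vg_lit_yellow : pvVariantGroup.get? "yellow" = some "yellow" := rfl
lemma vg_lit_gold : pvVariantGroup.get? "gold" = some "yellow" := rfl
lemma vg_lit_amber : pvVariantGroup.get? "amber" = some "yellow" := rfl
lemma vg_lit_white : pvVariantGroup.get? "white" = some "white" := rfl
lemma vg_lit_silver : pvVariantGroup.get? "silver" = some "white" := rfl
lemma vg_lit_light : pvVariantGroup.get? "light" = some "white" := rfl
lemma vg_lit_black : pvVariantGroup.get? "black" = some "black" := rfl
lemma vg_lit_dark : pvVariantGroup.get? "dark" = some "black" := rfl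
lemma vg_lit_purple : pvVariantGroup.get? "purple" = some "purple" := rfl
lemma vg_lit_violet : pvVariantGroup.get? "violet" = some "purple" := rfl
lemma vg_lit_magenta : pvVariantGroup.get? "magenta" = some "purple" := rfl

lemma vg_red (t : String) : pvVariantGroup.get? t = some "red" ↔ (t = "red" ∨ t = "crimson" ∨ t = "maroon") := by
  rw [vg_eq t]; split_ifs <;> simp_all <;> aesop
lemma vg_blue (t : String) : pvVariantGroup.get? t = some "blue" ↔ (t = "blue" ∨ t = "navy" ∨ t = "royal" ∨ t = "sky") := by
  rw [vg_eq t]; split_ifs <;> simp_all <;> aesop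
lemma vg_green (t : String) : pvVariantGroup.get? t = some "green" ↔ (t = "green" ∨ t = "forest" ∨ t = "lime") := by
  rw [vg_eq t]; split_ifs <;> simp_all <;> aesop
lemma vg_yellow (t : String) : pvVariantGroup.get? t = some "yellow" ↔ (t = "yellow" ∨ t = "gold" ∨ t = "amber") := by
  rw [vg_eq t]; split_ifs <;> simp_all <;> aesop
lemma vg_white (t : String) : pvVariantGroup.get? t = some "white" ↔ (t = "white" ∨ t = "silver" ∨ t = "light") := by
  rw [vg_eq t]; split_ifs <;> simp_all <;> aesop
lemma vg_black (t : String) : pvVariantGroup.get? t = some "black" ↔ (t = "black" ∨ t = "dark") := by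
  rw [vg_eq t]; split_ifs <;> simp_all <;> aesop
lemma vg_purple (t : String) : pvVariantGroup.get? t = some "purple" ↔ (t = "purple" ∨ t = "violet" ∨ t = "magenta") := by
  rw [vg_eq t]; split_ifs <;> simp_all <;> aesop

set_option maxHeartbeats 1000000 in
lemma core (d t1 t2 : String) :
    pvLoopA d t1 t2 pvVariantsA =
      (match pvVariantGroup.get? d with
       | none => "unknown"
       | some g =>
         if pvVariantGroup.get? t1 = some g then "team1"
         else if pvVariantGroup.get? t2 = some g then "team2"
         else "unknown") := by
  by_cases h1 : d ∈ (["red", "crimson", "maroon"] : List String)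
  · rcases (show d = "red" ∨ d = "crimson" ∨ d = "maroon" by simpa using h1) with rfl|rfl|rfl <;>
      simp [pvLoopA, pvVariantsA, vg_lit_red, vg_lit_crimson, vg_lit_maroon, vg_lit_blue, vg_lit_navy, vg_lit_royal, vg_lit_sky, vg_lit_green, vg_lit_forest, vg_lit_lime, vg_lit_yellow, vg_lit_gold, vg_lit_amber, vg_lit_white, vg_lit_silver, vg_lit_light, vg_lit_black, vg_lit_dark, vg_lit_purple, vg_lit_violet, vg_lit_magenta, vg_red, vg_blue, vg_green, vg_yellow, vg_white, vg_black, vg_purple]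
  by_cases h2 : d ∈ (["blue", "navy", "royal", "sky"] : List String)
  · rcases (show d = "blue" ∨ d = "navy" ∨ d = "royal" ∨ d = "sky" by simpa using h2) with rfl|rfl|rfl|rfl <;>
      simp [pvLoopA, pvVariantsA, vg_lit_red, vg_lit_crimson, vg_lit_maroon, vg_lit_blue, vg_lit_navy, vg_lit_royal, vg_lit_sky, vg_lit_green, vg_lit_forest, vg_lit_lime, vg_lit_yellow, vg_lit_gold, vg_lit_amber, vg_lit_white, vg_lit_silver, vg_lit_light, vg_lit_black, vg_lit_dark, vg_lit_purple, vg_lit_violet, vg_lit_magenta, vg_red, vg_blue, vg_green, vg_yellow, vg_white, vg_black, vg_purple]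
  by_cases h3 : d ∈ (["green", "forest", "lime"] : List String)
  · rcases (show d = "green" ∨ d = "forest" ∨ d = "lime" by simpa using h3) with rfl|rfl|rfl <;>
      simp [pvLoopA, pvVariantsA, vg_lit_red, vg_lit_crimson, vg_lit_maroon, vg_lit_blue, vg_lit_navy, vg_lit_royal, vg_lit_sky, vg_lit_green, vg_lit_forest, vg_lit_lime, vg_lit_yellow, vg_lit_gold, vg_lit_amber, vg_lit_white, vg_lit_silver, vg_lit_light, vg_lit_black, vg_lit_dark, vg_lit_purple, vg_lit_violet, vg_lit_magenta, vg_red, vg_blue, vg_green, vg_yellow, vg_white, vg_black, vg_purple]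
  by_cases h4 : d ∈ (["yellow", "gold", "amber"] : List String)
  · rcases (show d = "yellow" ∨ d = "gold" ∨ d = "amber" by simpa using h4) with rfl|rfl|rfl <;>
      simp [pvLoopA, pvVariantsA, vg_lit_red, vg_lit_crimson, vg_lit_maroon, vg_lit_blue, vg_lit_navy, vg_lit_royal, vg_lit_sky, vg_lit_green, vg_lit_forest, vg_lit_lime, vg_lit_yellow, vg_lit_gold, vg_lit_amber, vg_lit_white, vg_lit_silver, vg_lit_light, vg_lit_black, vg_lit_dark, vg_lit_purple, vg_lit_violet, vg_lit_magenta, vg_red, vg_blue, vg_green, vg_yellow, vg_white, vg_black, vg_purple]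
  by_cases h5 : d ∈ (["white", "silver", "light"] : List String)
  · rcases (show d = "white" ∨ d = "silver" ∨ d = "light" by simpa using h5) with rfl|rfl|rfl <;>
      simp [pvLoopA, pvVariantsA, vg_lit_red, vg_lit_crimson, vg_lit_maroon, vg_lit_blue, vg_lit_navy, vg_lit_royal, vg_lit_sky, vg_lit_green, vg_lit_forest, vg_lit_lime, vg_lit_yellow, vg_lit_gold, vg_lit_amber, vg_lit_white, vg_lit_silver, vg_lit_light, vg_lit_black, vg_lit_dark, vg_lit_purple, vg_lit_violet, vg_lit_magenta, vg_red, vg_blue, vg_green, vg_yellow, vg_white, vg_black, vg_purple]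
  by_cases h6 : d ∈ (["black", "dark"] : List String)
  · rcases (show d = "black" ∨ d = "dark" by simpa using h6) with rfl|rfl <;>
      simp [pvLoopA, pvVariantsA, vg_lit_red, vg_lit_crimson, vg_lit_maroon, vg_lit_blue, vg_lit_navy, vg_lit_royal, vg_lit_sky, vg_lit_green, vg_lit_forest, vg_lit_lime, vg_lit_yellow, vg_lit_gold, vg_lit_amber, vg_lit_white, vg_lit_silver, vg_lit_light, vg_lit_black, vg_lit_dark, vg_lit_purple, vg_lit_violet, vg_lit_magenta, vg_red, vg_blue, vg_green, vg_yellow, vg_white, vg_black, vg_purple]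
  by_cases h7 : d ∈ (["purple", "violet", "magenta"] : List String)
  · rcases (show d = "purple" ∨ d = "violet" ∨ d = "magenta" by simpa using h7) with rfl|rfl|rfl <;>
      simp [pvLoopA, pvVariantsA, vg_lit_red, vg_lit_crimson, vg_lit_maroon, vg_lit_blue, vg_lit_navy, vg_lit_royal, vg_lit_sky, vg_lit_green, vg_lit_forest, vg_lit_lime, vg_lit_yellow, vg_lit_gold, vg_lit_amber, vg_lit_white, vg_lit_silver, vg_lit_light, vg_lit_black, vg_lit_dark, vg_lit_purple, vg_lit_violet, vg_lit_magenta, vg_red, vg_blue, vg_green, vg_yellow, vg_white, vg_black, vg_purple]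
  simp only [List.mem_cons, List.not_mem_nil, or_false, not_or] at h1 h2 h3 h4 h5 h6 h7
  rw [vg_eq d]
  simp [pvLoopA, pvVariantsA, h1, h2, h3, h4, h5, h6, h7]

-- ===== VERDICT (by name: the statement is the Claim_ definition above) =====
theorem determine_team_from_color_spec : Claim_equal_determine_team_from_color := by
  intro d c1 c2 _ hpre
  unfold Spec_determine_team_from_color determine_team_from_color determine_team_from_color_alt
  unfold Pre_determine_team_from_color at hpre
  rcases h1 : (PySem.Dict.mk c1).get? "name" with _ | n1
  · simp [h1] at hpre
  · simp only [h1] at hpre ⊢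
    by_cases e1 : PySem.Str.lower d = PySem.Str.lower n1
    · simp [e1]
    · rcases h2 : (PySem.Dict.mk c2).get? "name" with _ | n2
      · simp [h2, e1] at hpre
      · simp only [h2, if_neg e1]
        by_cases e2 : PySem.Str.lower d = PySem.Str.lower n2
        · simp [e2]
        · simp only [if_neg e2]
          exact core _ _ _
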